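-- pv_equiv track=rewrite | github.com/sncws0217/codingtest | Prog 60058.py | check
-- ===== SOURCE A (Python) =====
-- def check(p):
--     x = y = 0
--     for i in range(len(p)):
--         if p[i] == '(':
--             x += 1
--         elif p[i] == ')':
--             y += 1
--         if x < y:
--             return False
--     return True
-- ===== SOURCE B (Python) =====
-- def check(p):
--     s = "".join(c for c in p if c in "()")
--     while "()" in s:
--         s = s.replace("()", "")
--     return ")" not in s
-- ===== Notes on version B (the rewrite author's own statement) =====
-- stated objective: alternative
-- what changed: Replaces the running-counter prefix scan with a string-rewriting normalisation: drop non-bracket chars, repeatedly delete matched '()' pairs until none remain, and accept iff no unmatched ')' survives.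
import Mathlib
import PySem

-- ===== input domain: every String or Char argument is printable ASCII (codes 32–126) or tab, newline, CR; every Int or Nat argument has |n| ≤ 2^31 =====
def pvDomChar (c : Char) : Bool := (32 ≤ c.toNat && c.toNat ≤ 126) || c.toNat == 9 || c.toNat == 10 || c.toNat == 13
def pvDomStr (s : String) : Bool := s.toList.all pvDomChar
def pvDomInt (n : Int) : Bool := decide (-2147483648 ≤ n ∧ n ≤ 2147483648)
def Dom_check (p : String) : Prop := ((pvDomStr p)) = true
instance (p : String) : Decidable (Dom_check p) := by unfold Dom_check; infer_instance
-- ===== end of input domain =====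

-- B replaces A's running-counter scan with a rewriting normalisation (filter brackets,
-- delete "()" pairs to a fixpoint, accept iff no ')' remains); alternative algorithm, same result.

-- ===== PORT A =====
-- loop over the characters carrying the two counters x and y; early `return False` when x < y
def checkLoop (cs : List Char) (x y : Int) : Bool :=
  match cs with
  | [] => true
  | c :: rest =>
    let x' := if c = '(' then x + 1 else x
    let y' := if c = '(' then y else if c = ')' then y + 1 else y
    if x' < y' then false else checkLoop rest x' y'

def check (p : String) : Bool := checkLoop p.toList 0 0

-- ===== PORT B =====
-- `"()" in s`
def hasPair : List Char → Bool
  | '(' :: ')' :: _ => true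
  | _ :: rest => hasPair rest
  | [] => false

-- one `s.replace("()", "")` pass: removes all non-overlapping "()" left to right
def stripPairs : List Char → List Char
  | '(' :: ')' :: rest => stripPairs rest
  | c :: rest => c :: stripPairs rest
  | [] => []

-- the `while "()" in s: s = s.replace("()", "")` loop; each iteration strictly shrinks
-- the string, so `length + 1` steps of fuel always reach the fixpoint (proved in
-- reduceFuel_noPair below); the fuel only makes the same loop structurally total
def reduceFuel : Nat → List Char → List Char
  | 0, cs => cs
  | f + 1, cs => if hasPair cs then reduceFuel f (stripPairs cs) else cs

def reduceLoop (cs : List Char) : List Char := reduceFuel (cs.length + 1) cs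

def check_alt (p : String) : Bool :=
  let s := p.toList.filter (fun c => c == '(' || c == ')')
  !((reduceLoop s).contains ')')

-- ===== PRECONDITION & SPEC =====
def Spec_check (p : String) (out : Bool) : Prop := out = check_alt p
instance (p : String) (out : Bool) : Decidable (Spec_check p out) := by unfold Spec_check; infer_instance

-- ===== CLAIM (what is proved, stated in full; the proofs are below) =====
def Claim_equal_check : Prop := ∀ (p : String), Dom_check p → Spec_check p (check p)

-- ===== LEMMAS AND PROOFS =====

-- single-balance reformulation of A's loop (proof helper only)
def nn (cs : List Char) (b : Int) : Bool :=
  match cs with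
  | [] => true
  | c :: r =>
    let b' := b + (if c = '(' then 1 else if c = ')' then -1 else 0)
    if b' < 0 then false else nn r b'

-- unguarded equation lemmas for the overlapping matches
theorem hasPair_cons (c : Char) (rest : List Char)
    (h : ∀ r', c = '(' → rest = ')' :: r' → False) : hasPair (c :: rest) = hasPair rest := by
  rw [hasPair.eq_def]
  split
  · rename_i r heq; injection heq with h1 h2; exact (h r h1 h2).elim
  · rename_i a r heq; injection heq with h1 h2; subst h1 h2; rfl
  · rename_i heq; cases heq

theorem stripPairs_cons (c : Char) (rest : List Char)
    (h : ∀ r', c = '(' → rest = ')' :: r' → False) :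
    stripPairs (c :: rest) = c :: stripPairs rest := by
  rw [stripPairs.eq_def]
  split
  · rename_i r heq; injection heq with h1 h2; exact (h r h1 h2).elim
  · rename_i a r heq; injection heq with h1 h2; subst h1 h2; rfl
  · rename_i heq; cases heq

theorem stripPairs_length_le (cs : List Char) : (stripPairs cs).length ≤ cs.length := by
  induction cs using stripPairs.induct with
  | case1 rest ih =>
    rw [show stripPairs ('(' :: ')' :: rest) = stripPairs rest from rfl]
    simp only [List.length_cons]; omega
  | case2 c rest hne ih =>
    rw [stripPairs_cons c rest hne]
    simp only [List.length_cons]; omega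
  | case3 => simp [stripPairs]

theorem stripPairs_length_lt (cs : List Char) (h : hasPair cs = true) :
    (stripPairs cs).length < cs.length := by
  induction cs using stripPairs.induct with
  | case1 rest ih =>
    have := stripPairs_length_le rest
    rw [show stripPairs ('(' :: ')' :: rest) = stripPairs rest from rfl]
    simp only [List.length_cons]; omega
  | case2 c rest hne ih =>
    rw [hasPair_cons c rest hne] at h
    have := ih h
    rw [stripPairs_cons c rest hne]
    simp only [List.length_cons]; omega
  | case3 => simp [hasPair] at h

theorem ifCloseOpen {α : Sort _} (a b : α) : (if (')' : Char) = '(' then a else b) = b :=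
  if_neg (by decide)

theorem checkLoop_eq_nn (cs : List Char) (x y : Int) :
    checkLoop cs x y = nn cs (x - y) := by
  induction cs generalizing x y with
  | nil => simp [checkLoop, nn]
  | cons c rest ih =>
    simp only [checkLoop, nn]
    by_cases h1 : c = '('
    · subst h1
      simp only [reduceIte]
      by_cases h2 : x + 1 < y
      · rw [if_pos h2, if_pos (show x - y + 1 < 0 by omega)]
      · rw [if_neg h2, if_neg (show ¬(x - y + 1 < 0) by omega), ih,
          show x + 1 - y = x - y + 1 by ring]
    · by_cases h2 : c = ')'
      · subst h2
        simp only [reduceIte, ifCloseOpen]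
        by_cases h3 : x < y + 1
        · rw [if_pos h3, if_pos (show x - y + -1 < 0 by omega)]
        · rw [if_neg h3, if_neg (show ¬(x - y + -1 < 0) by omega), ih,
            show x - (y + 1) = x - y + -1 by ring]
      · rw [if_neg h1, if_neg h1, if_neg h1, if_neg h2, if_neg h2]
        by_cases h3 : x < y
        · rw [if_pos h3, if_pos (show x - y + 0 < 0 by omega)]
        · rw [if_neg h3, if_neg (show ¬(x - y + 0 < 0) by omega),
            show x - y + 0 = x - y by ring, ih]

-- non-bracket chars contribute 0, so filtering them out preserves nn (from b ≥ 0)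
theorem nn_filter (cs : List Char) (b : Int) (hb : 0 ≤ b) :
    nn (cs.filter (fun c => c == '(' || c == ')')) b = nn cs b := by
  induction cs generalizing b with
  | nil => simp
  | cons c rest ih =>
    by_cases h1 : c = '(' <;> by_cases h2 : c = ')'
    · subst h1; simp at h2
    · subst h1
      simp only [List.filter_cons, nn, reduceIte, BEq.rfl, Bool.true_or]
      rw [if_neg (show ¬(b + 1 < 0) by omega), if_neg (show ¬(b + 1 < 0) by omega),
        ih (b + 1) (by omega)]
    · subst h2
      simp only [List.filter_cons, nn, reduceIte, ifCloseOpen]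
      rw [show ((')' : Char) == '(' || (')' : Char) == ')') = true from rfl, if_pos rfl]
      simp only [nn, reduceIte, ifCloseOpen]
      by_cases h3 : b + -1 < 0
      · rw [if_pos h3, if_pos h3]
      · rw [if_neg h3, if_neg h3, ih (b + -1) (by omega)]
    · have hf : (c == '(' || c == ')') = false := by
        simp [h1, h2]
      simp only [List.filter_cons, hf, Bool.false_eq_true, if_false, nn, if_neg h1, if_neg h2]
      rw [if_neg (show ¬(b + 0 < 0) by omega), show b + 0 = b by ring, ih b hb]

-- deleting an adjacent "()" pair preserves nn (from b ≥ 0)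
theorem nn_stripPairs (cs : List Char) (b : Int) (hb : 0 ≤ b) :
    nn (stripPairs cs) b = nn cs b := by
  induction cs using stripPairs.induct generalizing b with
  | case1 rest ih =>
    rw [show stripPairs ('(' :: ')' :: rest) = stripPairs rest from rfl]
    simp only [nn, reduceIte, ifCloseOpen]
    rw [if_neg (show ¬(b + 1 < 0) by omega),
      if_neg (show ¬(b + 1 + -1 < 0) by omega),
      show b + 1 + -1 = b by ring, ih b hb]
  | case2 c rest hne ih =>
    rw [stripPairs_cons c rest hne]
    simp only [nn]
    by_cases h1 : c = '('
    · subst h1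
      simp only [reduceIte]
      rw [if_neg (show ¬(b + 1 < 0) by omega), if_neg (show ¬(b + 1 < 0) by omega),
        ih (b + 1) (by omega)]
    · by_cases h2 : c = ')'
      · subst h2
        simp only [reduceIte, ifCloseOpen]
        by_cases h3 : b + -1 < 0
        · rw [if_pos h3, if_pos h3]
        · rw [if_neg h3, if_neg h3, ih (b + -1) (by omega)]
      · rw [if_neg h1, if_neg h2, if_neg (show ¬(b + 0 < 0) by omega), ih (b + 0) (by omega),
          if_neg (show ¬(b + 0 < 0) by omega)]
  | case3 => rfl

theorem nn_reduceFuel (f : Nat) (cs : List Char) (b : Int) (hb : 0 ≤ b) :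
    nn (reduceFuel f cs) b = nn cs b := by
  induction f generalizing cs with
  | zero => rfl
  | succ f ih =>
    rw [reduceFuel]
    by_cases h : hasPair cs = true
    · rw [if_pos h, ih (stripPairs cs), nn_stripPairs cs b hb]
    · rw [if_neg h]

theorem nn_reduceLoop (cs : List Char) (b : Int) (hb : 0 ≤ b) :
    nn (reduceLoop cs) b = nn cs b := nn_reduceFuel _ cs b hb

def bracketOnly (cs : List Char) : Bool := cs.all (fun c => c == '(' || c == ')')

theorem bracketOnly_stripPairs (cs : List Char) (h : bracketOnly cs = true) :
    bracketOnly (stripPairs cs) = true := by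
  induction cs using stripPairs.induct with
  | case1 rest ih =>
    rw [show stripPairs ('(' :: ')' :: rest) = stripPairs rest from rfl]
    simp only [bracketOnly, List.all_cons, Bool.and_eq_true] at h
    exact ih h.2.2
  | case2 c rest hne ih =>
    rw [stripPairs_cons c rest hne]
    simp only [bracketOnly, List.all_cons, Bool.and_eq_true] at h ⊢
    exact ⟨h.1, ih h.2⟩
  | case3 => simp [stripPairs, bracketOnly]

theorem bracketOnly_reduceFuel (f : Nat) (cs : List Char) (h : bracketOnly cs = true) :
    bracketOnly (reduceFuel f cs) = true := by
  induction f generalizing cs with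
  | zero => exact h
  | succ f ih =>
    rw [reduceFuel]
    by_cases hp : hasPair cs = true
    · rw [if_pos hp]; exact ih (stripPairs cs) (bracketOnly_stripPairs cs h)
    · rwa [if_neg hp]

theorem bracketOnly_reduceLoop (cs : List Char) (h : bracketOnly cs = true) :
    bracketOnly (reduceLoop cs) = true := bracketOnly_reduceFuel _ cs h

theorem reduceFuel_noPair (f : Nat) (cs : List Char) (hf : cs.length < f) :
    hasPair (reduceFuel f cs) = false := by
  induction f generalizing cs with
  | zero => omega
  | succ f ih =>
    rw [reduceFuel]
    by_cases hp : hasPair cs = true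
    · rw [if_pos hp]
      exact ih (stripPairs cs) (by have := stripPairs_length_lt cs hp; omega)
    · rw [if_neg hp]; simpa using hp

theorem reduceLoop_noPair (cs : List Char) : hasPair (reduceLoop cs) = false :=
  reduceFuel_noPair _ cs (by omega)

-- after a '(' in a pair-free bracket-only string, no ')' can ever follow
theorem noClose_of_open (rest : List Char) (hr : bracketOnly rest = true)
    (hp : hasPair ('(' :: rest) = false) : rest.count ')' = 0 := by
  induction rest with
  | nil => rfl
  | cons d r' ih =>
    have hd : ¬ d = ')' := by
      intro h; subst h
      rw [show hasPair ('(' :: ')' :: r') = true from rfl] at hp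
      simp at hp
    simp only [bracketOnly, List.all_cons, Bool.and_eq_true] at hr
    have hd1 : d = '(' := by
      rcases Bool.or_eq_true_iff.mp hr.1 with h | h
      · exact eq_of_beq h
      · exact absurd (eq_of_beq h) hd
    subst hd1
    have hp1 : hasPair ('(' :: r') = false := by
      rw [hasPair_cons '(' ('(' :: r')
        (by intro r'' _ he; injection he with he1 _; exact absurd he1 (by decide))] at hp
      exact hp
    rw [List.count_cons]
    rw [ih (by simp only [bracketOnly]; exact hr.2) hp1]
    simp

-- on a bracket-only string with no adjacent "()", nn b tests whether b covers all the ')'s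
theorem nn_normal (r : List Char) (hr : bracketOnly r = true) (hp : hasPair r = false)
    (b : Int) (hb : 0 ≤ b) :
    nn r b = decide ((r.count ')' : Int) ≤ b) := by
  induction r generalizing b with
  | nil => simp [nn, hb]
  | cons c rest ih =>
    simp only [bracketOnly, List.all_cons, Bool.and_eq_true] at hr
    by_cases h2 : c = ')'
    · subst h2
      have hp' : hasPair rest = false := by
        rw [hasPair_cons ')' rest (by intro r' h _; exact absurd h (by decide))] at hp
        exact hp
      simp only [nn, ifCloseOpen, List.count_cons, BEq.rfl, if_pos]
      by_cases h3 : b + -1 < 0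
      · rw [if_pos h3]
        have hcnt : (0:Int) ≤ (rest.count ')' : Int) := by positivity
        symm
        simp only [decide_eq_false_iff_not]
        push_cast
        omega
      · rw [if_neg h3, ih (by simp only [bracketOnly]; exact hr.2) hp' (b + -1) (by omega)]
        congr 1
        simp only [eq_iff_iff]
        push_cast
        omega
    · have h1 : c = '(' := by
        rcases Bool.or_eq_true_iff.mp hr.1 with h | h
        · exact eq_of_beq h
        · exact absurd (eq_of_beq h) h2
      subst h1
      have hrest : rest.count ')' = 0 :=
        noClose_of_open rest (by simp only [bracketOnly]; exact hr.2) hp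
      have hp' : hasPair rest = false := by
        cases rest with
        | nil => rfl
        | cons d r' =>
          have hd : ∀ r'', '(' = '(' → d :: r' = ')' :: r'' → False := by
            intro r'' _ he
            injection he with he1 he2
            subst he1
            rw [show hasPair ('(' :: ')' :: r') = true from rfl] at hp
            simp at hp
          rw [hasPair_cons '(' (d :: r') hd] at hp
          exact hp
      simp only [nn, reduceIte, List.count_cons]
      rw [if_neg (show ¬(b + 1 < 0) by omega),
        ih (by simp only [bracketOnly]; exact hr.2) hp' (b + 1) (by omega)]
      rw [show (('(' : Char) == ')') = false from rfl]
      simp only [Bool.false_eq_true, if_false, hrest]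
      simp [hb, show (0:Int) ≤ b + 1 by omega]

-- ===== VERDICT (by name: the statement is the Claim_ definition above) =====
theorem check_spec : Claim_equal_check := by
  intro p _
  unfold Spec_check check check_alt
  rw [checkLoop_eq_nn, show (0:Int) - 0 = 0 by ring]
  rw [← nn_filter p.toList 0 le_rfl]
  set s := p.toList.filter (fun c => c == '(' || c == ')') with hs
  rw [← nn_reduceLoop s 0 le_rfl]
  have hbr : bracketOnly (reduceLoop s) = true :=
    bracketOnly_reduceLoop s (by
      simp only [bracketOnly, hs, List.all_filter]
      simp only [List.all_eq_true]
      intro x _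
      cases x == '(' || x == ')' <;> simp)
  rw [nn_normal _ hbr (reduceLoop_noPair s) 0 le_rfl]
  have hc : (((reduceLoop s).count ')' : Int) ≤ 0) ↔ ((')' : Char) ∉ reduceLoop s) := by
    rw [← List.count_eq_zero]; omega
  by_cases hm : (')' : Char) ∈ reduceLoop s
  · have hx : ¬ ((reduceLoop s).count ')' = 0) := fun h0 => hc.mp (by simp [h0]) hm
    simp [List.contains_eq_mem, hm, hx]
  · have hx : (reduceLoop s).count ')' = 0 := by
      have := hc.mpr hm; omega
    simp [List.contains_eq_mem, hm, hx]
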